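-- pv_equiv track=rewrite | github.com/bcharris9/sdgfqaef | pipeline_one_lab/prepare_finetune_one_lab.py | ordered_measurement_keys
-- ===== SOURCE A (Python) =====
-- def metric_suffix_priority(key: str, stat_mode: str) -> tuple[int, bool]:
--     low = key.lower()
--     if low.endswith("_max"):
--         suffix_rank = 0
--     elif low.endswith("_rms"):
--         suffix_rank = 1
--     elif low.endswith("_min"):
--         suffix_rank = 2
--     else:
--         suffix_rank = 3
--
--     if stat_mode == "full":
--         allowed = True
--     elif stat_mode == "max_only":
--         allowed = low.endswith("_max") or ("_" not in low)
--     else:  # max_rms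
--         allowed = low.endswith("_max") or low.endswith("_rms") or ("_" not in low)
--     return suffix_rank, allowed
--
-- def measurement_group_priority(key: str, prefer_voltage_keys: bool) -> int:
--     low = key.lower()
--     if low.startswith("v_"):
--         return 0 if prefer_voltage_keys else 1
--     if low.startswith("i_"):
--         return 1 if prefer_voltage_keys else 0
--     if low in {"temp", "tnom"}:
--         return 2
--     if low in {"method", "solver"}:
--         return 3
--     return 4
--
-- def ordered_measurement_keys(
--     measurements: dict,
--     max_measurements: int,
--     voltage_only: bool,
--     stat_mode: str,
--     prefer_voltage_keys: bool,
-- ) -> list[str]: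
--     if not measurements:
--         return []
--
--     ranked: list[tuple[tuple[int, int, str], str]] = []
--     for key in measurements.keys():
--         low = str(key).lower()
--         if voltage_only and not low.startswith("v_"):
--             continue
--         suffix_rank, allowed = metric_suffix_priority(low, stat_mode)
--         if not allowed:
--             continue
--         group_rank = measurement_group_priority(low, prefer_voltage_keys)
--         ranked.append(((group_rank, suffix_rank, low), str(key)))
--
--     ranked.sort(key=lambda item: item[0])
--     keys = [k for _, k in ranked]
--     return keys[: max(1, max_measurements)]
-- ===== SOURCE B (Python) =====
-- # B: bounded partial selection -- keep only the current best max(1, max_measurements)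
-- # ranked entries in a sorted buffer while scanning the keys once, instead of
-- # building the full decorated list, fully sorting it and truncating.
--
-- def metric_suffix_priority(key: str, stat_mode: str) -> tuple[int, bool]:
--     low = key.lower()
--     if low.endswith("_max"):
--         suffix_rank = 0
--     elif low.endswith("_rms"):
--         suffix_rank = 1
--     elif low.endswith("_min"):
--         suffix_rank = 2
--     else:
--         suffix_rank = 3
--
--     if stat_mode == "full":
--         allowed = True
--     elif stat_mode == "max_only":
--         allowed = low.endswith("_max") or ("_" not in low)
--     else:  # max_rms
--         allowed = low.endswith("_max") or low.endswith("_rms") or ("_" not in low)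
--     return suffix_rank, allowed
--
-- def measurement_group_priority(key: str, prefer_voltage_keys: bool) -> int:
--     low = key.lower()
--     if low.startswith("v_"):
--         return 0 if prefer_voltage_keys else 1
--     if low.startswith("i_"):
--         return 1 if prefer_voltage_keys else 0
--     if low in {"temp", "tnom"}:
--         return 2
--     if low in {"method", "solver"}:
--         return 3
--     return 4
--
-- def _insertion_index(best, item):
--     # stable insertion point: right before the first entry of strictly greater rank
--     i = 0
--     while i < len(best) and not item[0] < best[i][0]:
--         i += 1
--     return i
--
-- def ordered_measurement_keys(
--     measurements: dict,
--     max_measurements: int,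
--     voltage_only: bool,
--     stat_mode: str,
--     prefer_voltage_keys: bool,
-- ) -> list[str]:
--     limit = max(1, max_measurements)
--     best = []  # ascending by rank, at most `limit` entries
--     for key in measurements.keys():
--         low = str(key).lower()
--         if voltage_only and not low.startswith("v_"):
--             continue
--         suffix_rank, allowed = metric_suffix_priority(low, stat_mode)
--         if not allowed:
--             continue
--         rank = (measurement_group_priority(low, prefer_voltage_keys), suffix_rank, low)
--         if len(best) == limit and not rank < best[-1][0]:
--             continue
--         item = (rank, str(key))
--         best.insert(_insertion_index(best, item), item)
--         if len(best) > limit: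
--             best.pop()
--     return [k for _, k in best]
-- ===== Notes on version B (the rewrite author's own statement) =====
-- stated objective: alternative
-- what changed: B replaces A's build-full-decorated-list / full-sort / truncate pipeline with a single-pass bounded selection that maintains only the current best max(1, max_measurements) ranked entries in a sorted buffer (stable insertion, skip when the entry cannot enter, drop the overflow).
import Mathlib
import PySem

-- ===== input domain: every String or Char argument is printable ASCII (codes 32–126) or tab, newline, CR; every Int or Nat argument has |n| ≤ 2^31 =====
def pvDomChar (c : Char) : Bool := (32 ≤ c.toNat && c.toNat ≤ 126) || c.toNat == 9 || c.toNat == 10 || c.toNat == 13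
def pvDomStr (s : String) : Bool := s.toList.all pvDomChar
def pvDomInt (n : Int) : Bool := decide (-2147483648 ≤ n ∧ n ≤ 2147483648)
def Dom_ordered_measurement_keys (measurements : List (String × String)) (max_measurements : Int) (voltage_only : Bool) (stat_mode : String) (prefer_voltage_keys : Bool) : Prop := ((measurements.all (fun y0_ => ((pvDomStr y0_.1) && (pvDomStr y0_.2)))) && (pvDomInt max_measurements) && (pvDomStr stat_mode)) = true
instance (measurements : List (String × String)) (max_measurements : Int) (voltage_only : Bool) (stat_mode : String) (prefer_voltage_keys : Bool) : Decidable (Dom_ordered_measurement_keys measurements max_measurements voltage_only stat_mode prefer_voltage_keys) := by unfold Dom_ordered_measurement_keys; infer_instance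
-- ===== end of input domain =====

-- B replaces A's build-decorated-list / full-sort / truncate pipeline by a single-pass
-- bounded selection keeping only the best max(1, max_measurements) ranked entries.

-- ===== PORT A =====
-- Python compares the rank tuples (group_rank, suffix_rank, low) lexicographically:
def pvLexLt (a b : Int × Int × String) : Bool :=
  a.1 < b.1 || (a.1 == b.1 && (a.2.1 < b.2.1 || (a.2.1 == b.2.1 && a.2.2 < b.2.2)))

def metric_suffix_priority (key : String) (stat_mode : String) : Int × Bool :=
  let low := PySem.Str.lower key
  let suffix_rank : Int :=
    if PySem.Str.endswith low "_max" then 0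
    else if PySem.Str.endswith low "_rms" then 1
    else if PySem.Str.endswith low "_min" then 2
    else 3
  let allowed : Bool :=
    if stat_mode == "full" then true
    else if stat_mode == "max_only" then
      PySem.Str.endswith low "_max" || !(PySem.Str.isIn "_" low)
    else
      PySem.Str.endswith low "_max" || PySem.Str.endswith low "_rms" || !(PySem.Str.isIn "_" low)
  (suffix_rank, allowed)

def measurement_group_priority (key : String) (prefer_voltage_keys : Bool) : Int :=
  let low := PySem.Str.lower key
  if PySem.Str.startswith low "v_" then (if prefer_voltage_keys then 0 else 1)
  else if PySem.Str.startswith low "i_" then (if prefer_voltage_keys then 1 else 0)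
  else if low == "temp" || low == "tnom" then 2
  else if low == "method" || low == "solver" then 3
  else 4

def ordered_measurement_keys (measurements : List (String × String)) (max_measurements : Int) (voltage_only : Bool) (stat_mode : String) (prefer_voltage_keys : Bool) : List String :=
  if measurements = [] then []
  else
    -- dict keys: first occurrences, in insertion order
    let keys := PySem.List.dedup (measurements.map Prod.fst)
    let ranked : List ((Int × Int × String) × String) := keys.foldl (fun acc key =>
      let low := PySem.Str.lower key
      if voltage_only && !(PySem.Str.startswith low "v_") then acc
      else
        let sa := metric_suffix_priority low stat_mode
        if !sa.2 then acc
        else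
          let group_rank := measurement_group_priority low prefer_voltage_keys
          acc ++ [((group_rank, sa.1, low), key)]) []
    -- ranked.sort(key=lambda item: item[0]) ported as the stable insertion sort
    -- (exactly PySem.List.sorted's definition, sorted_eq_foldl_insertBy) with the
    -- tuple key compared lexicographically by pvLexLt — exact for Python's stable sort
    let sortedR := ranked.foldl (fun acc item =>
      PySem.List.insertBy (fun a b => pvLexLt a.1 b.1) item acc) []
    let keys2 := sortedR.map (fun item => item.2)
    PySem.List.slice keys2 none (some (max 1 max_measurements))

-- ===== PORT B =====
-- Source B's _insertion_index while loop: index of the first entry of strictly greater rank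
def insert_idx (best : List ((Int × Int × String) × String)) (item : (Int × Int × String) × String) : Nat :=
  match best with
  | [] => 0
  | b0 :: rest => if pvLexLt item.1 b0.1 then 0 else insert_idx rest item + 1

-- the guarded bounded insertion of Source B's loop body; best[-1] is ported with
-- pyGetD (the default is never used: the access is guarded by len(best) == limit >= 1)
def pvBStep (limit : Int) (best : List ((Int × Int × String) × String)) (item : (Int × Int × String) × String) : List ((Int × Int × String) × String) :=
  if ((best.length : Int) == limit) && !(pvLexLt item.1 (PySem.List.pyGetD best (-1) item).1) then best
  else
    -- best.insert(i, item); best.pop() removes the last element (b' is nonempty here)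
    let b' := PySem.List.insert best ((insert_idx best item : Nat) : Int) item
    if limit < (b'.length : Int) then b'.dropLast else b'

def ordered_measurement_keys_alt (measurements : List (String × String)) (max_measurements : Int) (voltage_only : Bool) (stat_mode : String) (prefer_voltage_keys : Bool) : List String :=
  let limit : Int := max 1 max_measurements
  let best := (PySem.List.dedup (measurements.map Prod.fst)).foldl (fun best key =>
    let low := PySem.Str.lower key
    if voltage_only && !(PySem.Str.startswith low "v_") then best
    else
      let sa := metric_suffix_priority low stat_mode
      if !sa.2 then best
      else
        pvBStep limit best ((measurement_group_priority low prefer_voltage_keys, sa.1, low), key)) []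
  best.map (fun item => item.2)

-- ===== PRECONDITION & SPEC =====
def Spec_ordered_measurement_keys (measurements : List (String × String)) (max_measurements : Int) (voltage_only : Bool) (stat_mode : String) (prefer_voltage_keys : Bool) (out : List String) : Prop := out = ordered_measurement_keys_alt measurements max_measurements voltage_only stat_mode prefer_voltage_keys
instance (measurements : List (String × String)) (max_measurements : Int) (voltage_only : Bool) (stat_mode : String) (prefer_voltage_keys : Bool) (out : List String) : Decidable (Spec_ordered_measurement_keys measurements max_measurements voltage_only stat_mode prefer_voltage_keys out) := by unfold Spec_ordered_measurement_keys; infer_instance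

-- ===== CLAIM (what is proved, stated in full; the proofs are below) =====
def Claim_equal_ordered_measurement_keys : Prop := ∀ (measurements : List (String × String)) (max_measurements : Int) (voltage_only : Bool) (stat_mode : String) (prefer_voltage_keys : Bool), Dom_ordered_measurement_keys measurements max_measurements voltage_only stat_mode prefer_voltage_keys → Spec_ordered_measurement_keys measurements max_measurements voltage_only stat_mode prefer_voltage_keys (ordered_measurement_keys measurements max_measurements voltage_only stat_mode prefer_voltage_keys)

-- ===== LEMMAS AND PROOFS =====
-- ===== LEMMAS AND PROOFS =====

def pvKeep (voltage_only : Bool) (stat_mode : String) (key : String) : Bool :=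
  !(voltage_only && !(PySem.Str.startswith (PySem.Str.lower key) "v_")) &&
    (metric_suffix_priority (PySem.Str.lower key) stat_mode).2

def pvPair (stat_mode : String) (prefer_voltage_keys : Bool) (key : String) : (Int × Int × String) × String :=
  ((measurement_group_priority (PySem.Str.lower key) prefer_voltage_keys,
     (metric_suffix_priority (PySem.Str.lower key) stat_mode).1, PySem.Str.lower key), key)

-- proof-side view of the rank tuples: the (noncomputable-order) lexicographic type
def pvToL (t : Int × Int × String) : Lex (Int × Lex (Int × String)) := toLex (t.1, toLex (t.2.1, t.2.2))

lemma pvLexLt_iff (a b : Int × Int × String) : pvLexLt a b = true ↔ pvToL a < pvToL b := by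
  simp [pvLexLt, pvToL, Prod.Lex.toLex_lt_toLex]

lemma pvLexLt_false (a b : Int × Int × String) (h : ¬ pvLexLt a b = true) : pvToL b ≤ pvToL a :=
  not_lt.1 (fun hl => h ((pvLexLt_iff a b).2 hl))

-- proof-side view of Source B's insertion as a one-pass structural recursion
def pvIns (best : List ((Int × Int × String) × String)) (item : (Int × Int × String) × String) : List ((Int × Int × String) × String) :=
  match best with
  | [] => [item]
  | b0 :: rest => if pvLexLt item.1 b0.1 then item :: b0 :: rest else b0 :: pvIns rest item

lemma insert_idx_le (ys : List ((Int × Int × String) × String)) (x : (Int × Int × String) × String) :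
    insert_idx ys x ≤ ys.length := by
  induction ys with
  | nil => simp [insert_idx]
  | cons y t ih =>
    by_cases h : pvLexLt x.1 y.1 = true <;> simp [insert_idx, h] <;> omega

lemma splice_eq_pvIns (ys : List ((Int × Int × String) × String)) (x : (Int × Int × String) × String) :
    ys.take (insert_idx ys x) ++ x :: ys.drop (insert_idx ys x) = pvIns ys x := by
  induction ys with
  | nil => simp [insert_idx, pvIns]
  | cons y t ih =>
    by_cases h : pvLexLt x.1 y.1 = true
    · simp [insert_idx, h, pvIns]
    · simp only [insert_idx, if_neg h, pvIns, List.take_succ_cons, List.drop_succ_cons,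
        List.cons_append]
      rw [ih]

lemma insert_port_eq_pvIns (ys : List ((Int × Int × String) × String)) (x : (Int × Int × String) × String) :
    PySem.List.insert ys ((insert_idx ys x : Nat) : Int) x = pvIns ys x := by
  rw [PySem.List.insert_natCast ys (insert_idx ys x) x (insert_idx_le ys x), splice_eq_pvIns]

lemma pvIns_eq_insertBy (ys : List ((Int × Int × String) × String)) (x : (Int × Int × String) × String) :
    pvIns ys x = PySem.List.insertBy (fun a b => pvLexLt a.1 b.1) x ys := by
  induction ys with
  | nil => rfl
  | cons y t ih => simp [pvIns, PySem.List.insertBy, ih]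

lemma length_pvIns (ys : List ((Int × Int × String) × String)) (x : (Int × Int × String) × String) :
    (pvIns ys x).length = ys.length + 1 := by
  induction ys with
  | nil => rfl
  | cons y t ih => by_cases h : pvLexLt x.1 y.1 = true <;> simp [pvIns, h, ih]

lemma take_pvIns (ys : List ((Int × Int × String) × String)) (x : (Int × Int × String) × String) (n : Nat) :
    (pvIns (ys.take n) x).take n = (pvIns ys x).take n := by
  induction ys generalizing n with
  | nil => simp
  | cons y t ih =>
    cases n with
    | zero => simp
    | succ m =>
      by_cases h : pvLexLt x.1 y.1 = true
      · simp only [List.take_succ_cons, pvIns, if_pos h]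
        cases m with
        | zero => simp
        | succ k =>
          simp only [List.take_succ_cons, List.take_take]
          have hmin : min k (k + 1) = k := by omega
          rw [hmin]
      · simp only [List.take_succ_cons, pvIns, if_neg h]
        rw [ih]

lemma take_pvIns_of_ge (ys : List ((Int × Int × String) × String)) (x : (Int × Int × String) × String) (n : Nat)
    (hn : n ≤ ys.length) (hge : ∀ y ∈ ys.take n, ¬ (pvLexLt x.1 y.1 = true)) :
    (pvIns ys x).take n = ys.take n := by
  induction ys generalizing n with
  | nil =>
    have : n = 0 := by simpa using hn
    subst this; simp
  | cons y t ih =>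
    cases n with
    | zero => simp
    | succ m =>
      have hy : ¬ (pvLexLt x.1 y.1 = true) := hge y (by simp)
      simp only [pvIns, if_neg hy, List.take_succ_cons]
      rw [ih m (by simpa using hn) (fun z hz => hge z (by simp [hz]))]

lemma pairwise_pvIns (ys : List ((Int × Int × String) × String)) (x : (Int × Int × String) × String)
    (h : ys.Pairwise (fun a b => pvToL a.1 ≤ pvToL b.1)) :
    (pvIns ys x).Pairwise (fun a b => pvToL a.1 ≤ pvToL b.1) := by
  induction ys with
  | nil => simp [pvIns]
  | cons y t ih =>
    rcases List.pairwise_cons.1 h with ⟨hy, ht⟩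
    by_cases hx : pvLexLt x.1 y.1 = true
    · have hx' : pvToL x.1 < pvToL y.1 := (pvLexLt_iff _ _).1 hx
      simp only [pvIns, if_pos hx]
      refine List.pairwise_cons.2 ⟨?_, List.pairwise_cons.2 ⟨hy, ht⟩⟩
      intro z hz
      rcases List.mem_cons.1 hz with rfl | hz
      · exact hx'.le
      · exact hx'.le.trans (hy z hz)
    · simp only [pvIns, if_neg hx]
      refine List.pairwise_cons.2 ⟨?_, ih ht⟩
      intro z hz
      rw [pvIns_eq_insertBy] at hz
      rcases (PySem.List.mem_insertBy _ _ _ _).1 hz with rfl | hz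
      · exact pvLexLt_false _ _ hx
      · exact hy z hz

lemma pairwise_le_getLast (ys : List ((Int × Int × String) × String))
    (hp : ys.Pairwise (fun a b => pvToL a.1 ≤ pvToL b.1)) :
    ∀ y ∈ ys, ∀ (h : ys ≠ []), pvToL y.1 ≤ pvToL (ys.getLast h).1 := by
  induction ys with
  | nil => intro y hy; simp at hy
  | cons a t ih =>
    rcases List.pairwise_cons.1 hp with ⟨ha, ht⟩
    intro y hy h
    cases t with
    | nil =>
      have hya : y = a := by simpa using hy
      subst hya; simp
    | cons b u =>
      rw [List.getLast_cons (by simp : (b :: u : List _) ≠ [])]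
      rcases List.mem_cons.1 hy with rfl | hy'
      · exact ha _ (List.getLast_mem _)
      · exact ih ht y hy' _

-- one bounded step equals "insert into the full sorted list, then take n"
lemma pvBStep_take (full : List ((Int × Int × String) × String)) (x : (Int × Int × String) × String) (limit : Int) (n : Nat)
    (hn : n = limit.toNat) (h1 : 1 ≤ limit)
    (hp : full.Pairwise (fun a b => pvToL a.1 ≤ pvToL b.1)) :
    pvBStep limit (full.take n) x = (pvIns full x).take n := by
  have hmin : (full.take n).length = min n full.length := List.length_take
  by_cases hc : ((((full.take n).length : Int) == limit) && !(pvLexLt x.1 (PySem.List.pyGetD (full.take n) (-1) x).1)) = true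
  · -- skip case: the candidate cannot beat the current worst kept entry
    rw [pvBStep, if_pos hc]
    simp only [Bool.and_eq_true, beq_iff_eq, Bool.not_eq_true'] at hc
    obtain ⟨hlen, hlast⟩ := hc
    have hlen' : (full.take n).length = n := by omega
    have hnle : n ≤ full.length := by omega
    have hne : full.take n ≠ [] := by
      intro h; rw [h] at hlen'; simp at hlen'; omega
    rw [PySem.List.pyGetD_neg_one _ _ hne] at hlast
    have hlast' : pvToL ((full.take n).getLast hne).1 ≤ pvToL x.1 :=
      pvLexLt_false _ _ (by simp [hlast])
    have hptake : (full.take n).Pairwise (fun a b => pvToL a.1 ≤ pvToL b.1) :=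
      hp.sublist (List.take_sublist n full)
    have hall : ∀ y ∈ full.take n, ¬ (pvLexLt x.1 y.1 = true) := by
      intro y hy hlt
      have hle : pvToL y.1 ≤ pvToL ((full.take n).getLast hne).1 :=
        pairwise_le_getLast _ hptake y hy hne
      exact lt_irrefl (pvToL x.1)
        (lt_of_lt_of_le ((pvLexLt_iff _ _).1 hlt) (hle.trans hlast'))
    exact (take_pvIns_of_ge full x n hnle hall).symm
  · -- insert case: insert, then drop the overflow
    rw [pvBStep, if_neg hc]
    simp only [insert_port_eq_pvIns]
    have hlb : (pvIns (full.take n) x).length = (full.take n).length + 1 :=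
      length_pvIns _ _
    by_cases hover : limit < ((pvIns (full.take n) x).length : Int)
    · simp only [if_pos hover]
      have hlen1 : (pvIns (full.take n) x).length = n + 1 := by omega
      rw [List.dropLast_eq_take, hlen1]
      simp only [Nat.add_sub_cancel]
      exact take_pvIns full x n
    · simp only [if_neg hover]
      have hle : (pvIns (full.take n) x).length ≤ n := by omega
      rw [← List.take_of_length_le hle, take_pvIns full x n]

lemma pvFold_take (L : List ((Int × Int × String) × String)) (full : List ((Int × Int × String) × String)) (limit : Int) (n : Nat)
    (hn : n = limit.toNat) (h1 : 1 ≤ limit)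
    (hp : full.Pairwise (fun a b => pvToL a.1 ≤ pvToL b.1)) :
    L.foldl (pvBStep limit) (full.take n) = (L.foldl (fun acc x => pvIns acc x) full).take n := by
  induction L generalizing full with
  | nil => simp
  | cons x t ih =>
    simp only [List.foldl_cons]
    rw [pvBStep_take full x limit n hn h1 hp]
    exact ih (pvIns full x) (pairwise_pvIns full x hp)

lemma sortA_eq_fold_pvIns (L : List ((Int × Int × String) × String)) :
    L.foldl (fun acc item => PySem.List.insertBy (fun a b => pvLexLt a.1 b.1) item acc) []
      = L.foldl (fun acc x => pvIns acc x) [] :=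
  PySem.List.foldl_congr_mem L _ _ []
    (fun acc x _ => (pvIns_eq_insertBy acc x).symm)

-- A's accumulation loop produces exactly the decorated filtered keys
lemma rankedA_eq (keys : List String) (voltage_only : Bool) (stat_mode : String) (prefer_voltage_keys : Bool) :
    keys.foldl (fun acc key =>
      if voltage_only && !(PySem.Str.startswith (PySem.Str.lower key) "v_") then acc
      else
        if !(metric_suffix_priority (PySem.Str.lower key) stat_mode).2 then acc
        else
          acc ++ [((measurement_group_priority (PySem.Str.lower key) prefer_voltage_keys,
            (metric_suffix_priority (PySem.Str.lower key) stat_mode).1, PySem.Str.lower key), key)]) []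
    = (keys.filter (pvKeep voltage_only stat_mode)).map (pvPair stat_mode prefer_voltage_keys) := by
  rw [PySem.List.foldl_congr_mem keys _
    (fun acc key => if pvKeep voltage_only stat_mode key then
        acc ++ [pvPair stat_mode prefer_voltage_keys key] else acc) []
    (by
      intro acc key _
      simp only [pvKeep, pvPair]
      cases hc1 : (voltage_only && !(PySem.Str.startswith (PySem.Str.lower key) "v_")) <;>
        cases hm2 : (metric_suffix_priority (PySem.Str.lower key) stat_mode).2 <;>
          simp)]
  rw [PySem.List.foldl_append_if]
  simp

-- B's loop equals the bounded fold over the same decorated filtered keys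
lemma foldB_eq (keys : List String) (limit : Int) (voltage_only : Bool) (stat_mode : String) (prefer_voltage_keys : Bool) :
    keys.foldl (fun best key =>
      if voltage_only && !(PySem.Str.startswith (PySem.Str.lower key) "v_") then best
      else
        if !(metric_suffix_priority (PySem.Str.lower key) stat_mode).2 then best
        else
          pvBStep limit best ((measurement_group_priority (PySem.Str.lower key) prefer_voltage_keys,
            (metric_suffix_priority (PySem.Str.lower key) stat_mode).1, PySem.Str.lower key), key)) []
    = ((keys.filter (pvKeep voltage_only stat_mode)).map (pvPair stat_mode prefer_voltage_keys)).foldl (pvBStep limit) [] := by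
  rw [PySem.List.foldl_congr_mem keys _
    (fun best key => if pvKeep voltage_only stat_mode key then
        pvBStep limit best (pvPair stat_mode prefer_voltage_keys key) else best) []
    (by
      intro best key _
      simp only [pvKeep, pvPair]
      cases hc1 : (voltage_only && !(PySem.Str.startswith (PySem.Str.lower key) "v_")) <;>
        cases hm2 : (metric_suffix_priority (PySem.Str.lower key) stat_mode).2 <;>
          simp)]
  rw [PySem.List.foldl_if_eq_foldl_filter, List.foldl_map]

-- ===== VERDICT (by name: the statement is the Claim_ definition above) =====
theorem ordered_measurement_keys_spec : Claim_equal_ordered_measurement_keys := by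
  intro ms mm vo sm pvk _
  unfold Spec_ordered_measurement_keys ordered_measurement_keys ordered_measurement_keys_alt
  by_cases hms : ms = []
  · simp [hms]
  · rw [if_neg hms]
    dsimp only
    have h1 : (1 : Int) ≤ max 1 mm := le_max_left 1 mm
    rw [rankedA_eq, foldB_eq]
    have hmain := pvFold_take
      (((PySem.List.dedup (ms.map Prod.fst)).filter (pvKeep vo sm)).map (pvPair sm pvk))
      [] (max 1 mm) (max 1 mm).toNat rfl h1 (by simp)
    simp only [List.take_nil] at hmain
    rw [hmain, sortA_eq_fold_pvIns,
        PySem.List.slice_to _ (by omega : (0:Int) ≤ max 1 mm),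
        ← List.map_take]
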